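-- pv_equiv track=rewrite | github.com/aeebbr/Algorithm | 2024/08/prog_17683_[3차]방금그곡.py | solution
-- ===== SOURCE A (Python) =====
-- def solution(m, musicinfos):
--     '''
--     #이 붙는 음을 구분
--     [C, C, #, B, C] 라면, [C, #C#, B, C] 로 변환
--     '''
--     def separate_sharp(arr):
--         stack = []
--         for j in range(len(arr)):
--             cur = arr[j]
--             if cur == '#':
--                 stack[-1] = '#' + stack[-1]
--                 stack[-1] += '#'
--             else:
--                 stack.append(cur)
--         return stack
--
--     def cal_play_time():
--         # 시작과 종료 시간을 분 단위로 변환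
--         start_hour, start_min = map(int, start_time.split(":"))
--         end_hour, end_min = map(int, end_time.split(":"))
--         start_to_min = start_hour * 60 + start_min
--         end_to_min = end_hour * 60 + end_min
--
--         # 음악 재생 시간 = 종료 시간 - 시작 시간
--         return end_to_min - start_to_min
--
--     def cal_play_melody(melody):
--         play_melody = []
--         cnt = 0 # 재생된 음의 개수
--
--         while True:
--             for s in melody:
--                 if cnt == play_time:
--                     return (" ").join(play_melody)
--                 play_melody.append(s)
--                 cnt += 1
--
--     answer = []
--     # m의 샵 구분
--     m = (" ").join(separate_sharp(list(m)))
--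
--     for musicinfo in musicinfos:
--         start_time, end_time, title, melody = musicinfo.split(",") # 시작한 시각, 끝난 시각, 음악 제목, 악보 정보
--         # 악보의 샵 구분
--         melody = separate_sharp(list(melody))
--         # 음악 재생 시간 계산
--         play_time = cal_play_time()
--         # 재생 시간동안 재생된 음 저장
--         play_melody = cal_play_melody(melody)
--
--         # 찾고있는 음이 재생된 것 안에 있는지 확인
--         if m in play_melody:
--             # (재생 시간, 음악이 입력된 순서, 제목)
--             answer.append((play_time, len(answer), title))
--
--     # 조건 같은 음악이 여러 개라면 <1. 재생 시간 내림차순, 2. 음악 입력 순서 오름차순> 정렬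
--     answer = sorted(answer, key = lambda x:[-x[0], x[1]])
--
--     if answer:
--         # 정렬 결과 가장 앞순서인 음악의 제목 반환
--         return answer[0][2]
--     else:
--         return "(None)"
-- ===== SOURCE B (Python) =====
-- def solution(m, musicinfos):
--     # Encode: each note with its k trailing sharps becomes '#'*k + note + '#'*k
--     # (same token language as the original encoding, built by lookahead grouping).
--     def encode(s):
--         toks = []
--         i = 0
--         while i < len(s):
--             j = i + 1
--             while j < len(s) and s[j] == '#':
--                 j += 1
--             k = j - i - 1
--             toks.append('#' * k + s[i] + '#' * k)
--             i = j
--         return toks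
--
--     def minutes(t):
--         h, mn = t.split(":")
--         return int(h) * 60 + int(mn)
--
--     enc_m = " ".join(encode(m))
--     L = len(enc_m)
--     candidates = []
--     for musicinfo in musicinfos:
--         start_time, end_time, title, melody = musicinfo.split(",")
--         play_time = minutes(end_time) - minutes(start_time)
--         toks = encode(melody)
--         if play_time == 0:
--             matched = (enc_m == "")
--         else:
--             # Period-bounded search: the played string is a T-character prefix of the
--             # infinite repetition of P (one melody period, space-terminated), so any
--             # occurrence of enc_m can be shifted to start inside the first period.
--             # It therefore suffices to search a window of min(T, c + L - 1) characters.
--             lens = [len(t) + 1 for t in toks]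
--             c = sum(lens)
--             q_full, r = divmod(play_time, len(toks))
--             T = q_full * c + sum(lens[:r]) - 1
--             P = " ".join(toks) + " "
--             window = (P * (L // c + 2))[: min(T, c + L - 1)]
--             matched = enc_m in window
--         if matched:
--             candidates.append((play_time, title))
--     if not candidates:
--         return "(None)"
--     return max(candidates, key=lambda x: x[0])[1]
-- ===== Notes on version B (the rewrite author's own statement) =====
-- stated objective: faster
-- what changed: Instead of materialising the whole played melody note by note for the full duration and then sorting the matches, B computes the played string's length arithmetically from one period, searches the pattern only in a window of one period plus the pattern length (any occurrence in a periodic string can be shifted into the first period), and picks the winner with a single built-in max (first maximum = earliest input order).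
import Mathlib
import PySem

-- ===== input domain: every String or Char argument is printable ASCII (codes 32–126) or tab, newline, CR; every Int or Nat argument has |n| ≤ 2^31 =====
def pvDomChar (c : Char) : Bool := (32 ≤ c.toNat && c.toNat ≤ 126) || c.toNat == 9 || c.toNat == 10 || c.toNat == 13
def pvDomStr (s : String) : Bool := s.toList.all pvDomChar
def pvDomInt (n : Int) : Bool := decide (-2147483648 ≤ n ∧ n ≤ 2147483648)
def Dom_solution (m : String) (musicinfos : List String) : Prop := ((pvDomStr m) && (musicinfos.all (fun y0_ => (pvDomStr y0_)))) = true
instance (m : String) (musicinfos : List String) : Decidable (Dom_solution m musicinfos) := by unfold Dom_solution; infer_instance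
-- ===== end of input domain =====

-- B replaces A's note-by-note replay of the whole duration and final sort by a
-- period-bounded substring search (only one melody period plus the pattern length is
-- ever materialised, the played length is computed arithmetically) and a single
-- built-in max for the winner; same return value on Pre_ (no argument is mutated).

-- ===== PORT A =====
def sepSharpA (arr : List Char) : List (List Char) :=
  arr.foldl (fun stack c =>
    if c = '#' then
      let s1 := PySem.List.pySetD stack (-1) ('#' :: PySem.List.pyGetD stack (-1) [])
      PySem.List.pySetD s1 (-1) (PySem.List.pyGetD s1 (-1) [] ++ ['#'])
    else stack ++ [[c]]) []

def calPlayTimeA (startTime endTime : String) : Int :=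
  match ((PySem.Str.split? startTime ":").getD []).map PySem.Int.ofStr?,
        ((PySem.Str.split? endTime ":").getD []).map PySem.Int.ofStr? with
  | [some sh, some sm], [some eh, some em] => (eh * 60 + em) - (sh * 60 + sm)
  | _, _ => 0

def innerA (pt : Int) : List (List Char) → List (List Char) → Int → (List Char) ⊕ (List (List Char) × Int)
  | [], acc, cnt => Sum.inr (acc, cnt)
  | s :: rest, acc, cnt =>
    if cnt = pt then Sum.inl (PySem.Chars.join [' '] acc)
    else innerA pt rest (acc ++ [s]) (cnt + 1)

def whileA (pt : Int) (melody : List (List Char)) : Nat → List (List Char) → Int → List Char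
  | 0, _, _ => []
  | fuel+1, acc, cnt =>
    match innerA pt melody acc cnt with
    | Sum.inl r => r
    | Sum.inr (acc', cnt') => whileA pt melody fuel acc' cnt'

def stepA (mEnc : List Char) (answer : List (Int × Int × String)) (info : String) : List (Int × Int × String) :=
  match PySem.Str.split? info "," with
  | some [st, en, title, mel] =>
    let melT := sepSharpA mel.toList
    let pt := calPlayTimeA st en
    let played := whileA pt melT (pt.toNat + 1) [] 0
    if PySem.Chars.isIn mEnc played then answer ++ [(pt, PySem.List.len answer, title)] else answer
  | _ => answer

def solution (m : String) (musicinfos : List String) : String :=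
  match PySem.List.sorted (musicinfos.foldl (stepA (PySem.Chars.join [' '] (sepSharpA m.toList))) [])
      (fun x => toLex (-x.1, x.2.1)) with
  | (_, _, t) :: _ => t
  | [] => "(None)"

-- ===== PORT B =====
def encodeB (s : List Char) : List (List Char) :=
  match s with
  | [] => []
  | c :: rest =>
    (List.replicate ((rest.takeWhile (fun d => d = '#')).length) '#' ++
       c :: List.replicate ((rest.takeWhile (fun d => d = '#')).length) '#')
      :: encodeB (rest.dropWhile (fun d => d = '#'))
termination_by s.length
decreasing_by
  have := List.length_dropWhile_le (fun d => d = '#') rest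
  simp
  omega

def minutesB (t : String) : Int :=
  match PySem.Str.split? t ":" with
  | some [h, mn] => (PySem.Int.ofStr? h).getD 0 * 60 + (PySem.Int.ofStr? mn).getD 0
  | _ => 0

-- period-bounded containment test: played is a T-character prefix of the infinite
-- repetition of P, so only a window of min T (c + L - 1) characters is searched
def matchedB (encm : List Char) (toks : List (List Char)) (pt : Int) : Bool :=
  if pt = 0 then decide (encm = [])
  else
    let lens := toks.map (fun t => PySem.List.len t + 1)
    let c := lens.sum
    let qfull := PySem.Int.floordiv pt (PySem.List.len toks)
    let r := PySem.Int.mod pt (PySem.List.len toks)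
    let T := qfull * c + (PySem.List.slice lens none (some r)).sum - 1
    let P := PySem.Chars.join [' '] toks ++ [' ']
    let L := PySem.List.len encm
    let window := PySem.List.slice (PySem.List.pyRepeat P (PySem.Int.floordiv L c + 2))
        none (some (min T (c + L - 1)))
    PySem.Chars.isIn encm window

def stepB (encm : List Char) (cands : List (Int × String)) (info : String) : List (Int × String) :=
  match PySem.Str.split? info "," with
  | some [st, en, title, mel] =>
    let pt := minutesB en - minutesB st
    if matchedB encm (encodeB mel.toList) pt then cands ++ [(pt, title)] else cands
  | _ => cands

def solution_alt (m : String) (musicinfos : List String) : String :=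
  match PySem.List.max?
      (musicinfos.foldl (stepB (PySem.Chars.join [' '] (encodeB m.toList))) []) (fun x => x.1) with
  | some b => b.2
  | none => "(None)"

-- ===== PRECONDITION & SPEC =====
-- Pre_solution is exactly the inputs on which the Python A returns normally: m must not
-- start with '#' (IndexError in separate_sharp), every musicinfo must split into exactly
-- 4 comma parts, both times into exactly 2 int-parsable colon parts (ValueError otherwise),
-- the melody must be nonempty and not start with '#' (IndexError / the replay loop would
-- never terminate), and the play time must be nonnegative (the replay loop never terminates
-- on a negative play time).
def pvParts (info : String) : List String := (PySem.Str.split? info ",").getD []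

def pvTimeOk (t : String) : Bool :=
  match ((PySem.Str.split? t ":").getD []).map PySem.Int.ofStr? with
  | [some _, some _] => true
  | _ => false

def pvMin (t : String) : Int :=
  match ((PySem.Str.split? t ":").getD []).map PySem.Int.ofStr? with
  | [some h, some mn] => h * 60 + mn
  | _ => 0

def Pre_solution (m : String) (musicinfos : List String) : Prop :=
  m.toList.head? ≠ some '#' ∧
  ∀ info ∈ musicinfos,
    (pvParts info).length = 4 ∧
    pvTimeOk ((pvParts info).getD 0 "") = true ∧
    pvTimeOk ((pvParts info).getD 1 "") = true ∧
    ((pvParts info).getD 3 "").toList ≠ [] ∧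
    ((pvParts info).getD 3 "").toList.head? ≠ some '#' ∧
    0 ≤ pvMin ((pvParts info).getD 1 "") - pvMin ((pvParts info).getD 0 "")

instance (m : String) (musicinfos : List String) : Decidable (Pre_solution m musicinfos) := by
  unfold Pre_solution; infer_instance

def pvWitness_solution : String × List String := ("ABC", ["12:00,12:03,HELLO,CDEFGAB"])

def Spec_solution (m : String) (musicinfos : List String) (out : String) : Prop := out = solution_alt m musicinfos
instance (m : String) (musicinfos : List String) (out : String) : Decidable (Spec_solution m musicinfos out) := by unfold Spec_solution; infer_instance

-- ===== CLAIM (what is proved, stated in full; the proofs are below) =====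
def Claim_equal_solution : Prop := ∀ (m : String) (musicinfos : List String), Dom_solution m musicinfos → Pre_solution m musicinfos → Spec_solution m musicinfos (solution m musicinfos)

-- ===== LEMMAS AND PROOFS =====
def sepStep (stack : List (List Char)) (c : Char) : List (List Char) :=
  if c = '#' then
    let s1 := PySem.List.pySetD stack (-1) ('#' :: PySem.List.pyGetD stack (-1) [])
    PySem.List.pySetD s1 (-1) (PySem.List.pyGetD s1 (-1) [] ++ ['#'])
  else stack ++ [[c]]

theorem pySetD_append_last {α : Type} (s : List α) (t v : α) :
    PySem.List.pySetD (s ++ [t]) (-1) v = s ++ [v] := by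
  have h1 : PySem.List.pyIdx? (s.length + 1) (-1) = some s.length := by
    simp [PySem.List.pyIdx?]
  simp [PySem.List.pySetD, PySem.List.pySet?, h1, List.set_append_right]

theorem sepStep_sharp (s : List (List Char)) (t : List Char) :
    sepStep (s ++ [t]) '#' = s ++ ['#' :: (t ++ ['#'])] := by
  simp [sepStep, PySem.List.pyGetD_neg_one_append_singleton, pySetD_append_last]

theorem fold_sharps (k : Nat) (rest : List Char) (s : List (List Char)) (t : List Char) :
    (List.replicate k '#' ++ rest).foldl sepStep (s ++ [t]) =
      rest.foldl sepStep (s ++ [List.replicate k '#' ++ t ++ List.replicate k '#']) := by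
  induction k generalizing t with
  | zero => simp
  | succ n ih =>
    rw [List.replicate_succ]
    simp only [List.cons_append, List.foldl_cons, sepStep_sharp]
    rw [ih]
    congr 2
    have hrep : ∀ (n : Nat) (l : List Char), List.replicate n '#' ++ '#' :: l = '#' :: (List.replicate n '#' ++ l) := by
      intro n l; induction n with
      | zero => simp
      | succ k ihk => simp [List.replicate_succ, ihk]
    simp [hrep]

theorem sep_fold_eq (cs : List Char) (h : cs.head? ≠ some '#') (s : List (List Char)) :
    cs.foldl sepStep s = s ++ encodeB cs := by
  induction cs using encodeB.induct generalizing s with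
  | case1 => simp [encodeB]
  | case2 c rest ih =>
    have hc : c ≠ '#' := by simpa using h
    have hstep : sepStep s c = s ++ [[c]] := by simp [sepStep, hc]
    have htw : rest.takeWhile (fun d => d = '#') =
        List.replicate ((rest.takeWhile (fun d => d = '#')).length) '#' := by
      rw [List.eq_replicate_iff]
      exact ⟨rfl, fun b hb => by simpa using List.mem_takeWhile_imp hb⟩
    have hsplit : rest = List.replicate ((rest.takeWhile (fun d => d = '#')).length) '#' ++
        rest.dropWhile (fun d => d = '#') := by
      conv_lhs => rw [← List.takeWhile_append_dropWhile (p := fun d => d = '#') (l := rest)]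
      rw [← htw]
    have hdh : (rest.dropWhile (fun d => d = '#')).head? ≠ some '#' := by
      intro hcon
      have := List.head?_dropWhile_not (p := fun d => d = '#') (l := rest)
      simp [hcon] at this
    rw [List.foldl_cons, hstep]
    conv_lhs => rw [hsplit]
    rw [fold_sharps, ih hdh]
    rw [encodeB]
    simp

theorem sepSharpA_eq (arr : List Char) : sepSharpA arr = arr.foldl sepStep [] := rfl

theorem innerA_spec (n : Nat) (mel : List (List Char)) : ∀ (acc : List (List Char)),
    innerA (n : Int) mel acc (acc.length : Int) =
      if acc.length ≤ n ∧ n < acc.length + mel.length then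
        Sum.inl (PySem.Chars.join [' '] (acc ++ mel.take (n - acc.length)))
      else Sum.inr (acc ++ mel, ((acc.length + mel.length : Nat) : Int)) := by
  induction mel with
  | nil =>
    intro acc
    rw [innerA]
    simp only [List.length_nil]
    rw [if_neg (by omega)]
    simp
  | cons s rest ih =>
    intro acc
    by_cases hn : acc.length = n
    · subst hn
      rw [innerA, if_pos rfl, if_pos (by simp)]
      simp
    · have h1 : ((acc.length : Int)) ≠ (n : Int) := by exact_mod_cast hn
      rw [innerA, if_neg h1,
        show (acc.length : Int) + 1 = (((acc ++ [s]).length : Nat) : Int) by simp,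
        ih (acc ++ [s])]
      simp only [List.length_append, List.length_cons]
      split_ifs with hA hB hB
      · have ht : n - acc.length = (n - (acc.length + 1)) + 1 := by omega
        rw [ht, List.take_succ_cons]
        simp
      · exfalso; simp at hA hB; omega
      · exfalso; simp at hA hB; omega
      · simp only [List.append_assoc, List.singleton_append, List.length_nil]
        norm_num
        ring

theorem flatten_replicate_length {α : Type} (r : Nat) (xs : List α) :
    (List.replicate r xs).flatten.length = r * xs.length := by
  simp [List.length_flatten, List.map_replicate, List.sum_replicate, smul_eq_mul]

theorem whileA_spec (n : Nat) (mel : List (List Char)) (hm : mel ≠ []) :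
    ∀ (fuel : Nat) (acc : List (List Char)), acc.length ≤ n →
      n - acc.length < (fuel + 1) * mel.length →
      whileA (n : Int) mel (fuel + 1) acc (acc.length : Int) =
        PySem.Chars.join [' '] (acc ++ ((List.replicate (fuel + 1) mel).flatten).take (n - acc.length)) := by
  have hml : 0 < mel.length := List.length_pos_of_ne_nil hm
  intro fuel
  induction fuel with
  | zero =>
    intro acc hle hfu
    rw [whileA, innerA_spec, if_pos (by omega)]
    simp
  | succ f ih =>
    intro acc hle hfu
    rw [whileA, innerA_spec]
    by_cases hc : acc.length ≤ n ∧ n < acc.length + mel.length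
    · rw [if_pos hc]
      rw [show (f + 1 + 1) = (f + 2) from rfl, List.replicate_succ, List.flatten_cons,
        List.take_append_of_le_length (by omega)]
    · rw [if_neg hc]
      dsimp only
      have hge : acc.length + mel.length ≤ n := by omega
      have h2 := ih (acc ++ mel) (by simp; omega)
        (by simp only [List.length_append]
            have hx : (f + 1 + 1) * mel.length = mel.length + (f + 1) * mel.length := by ring
            omega)
      simp only [List.length_append] at h2
      rw [h2]
      congr 1
      rw [List.append_assoc]
      congr 1
      conv_rhs => rw [show f + 1 + 1 = (f + 1) + 1 from rfl, List.replicate_succ,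
        List.flatten_cons, List.take_append]
      conv_rhs => rw [List.take_of_length_le (show mel.length ≤ n - acc.length by omega)]
      congr 2
      omega

-- ---------- period-bounded window machinery ----------
def JpB (ts : List (List Char)) : List Char := (ts.map (fun t => t ++ [' '])).flatten

theorem len_comp_space : (List.length ∘ fun t : List Char => t ++ [' ']) = (fun t : List Char => t.length + 1) := by
  funext t; simp

theorem jp_length (ts : List (List Char)) :
    (JpB ts).length = (ts.map (fun t => t.length + 1)).sum := by
  simp only [JpB, List.length_flatten, List.map_map, len_comp_space]

theorem join_append_space (ts : List (List Char)) (h : ts ≠ []) :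
    PySem.Chars.join [' '] ts ++ [' '] = JpB ts := by
  induction ts with
  | nil => exact absurd rfl h
  | cons a rest ih =>
    cases rest with
    | nil => simp [JpB, PySem.Chars.join_singleton]
    | cons b r2 =>
      have hrec := ih (by simp)
      rw [JpB, List.map_cons, List.flatten_cons, PySem.Chars.join_cons_cons,
        List.append_assoc, List.append_assoc, hrec, JpB]
      simp

theorem join_eq_take (ts : List (List Char)) (h : ts ≠ []) :
    PySem.Chars.join [' '] ts = (JpB ts).take ((ts.map (fun t => t.length + 1)).sum - 1) := by
  have h1 := join_append_space ts h
  have h2 : (PySem.Chars.join [' '] ts).length + 1 = (ts.map (fun t => t.length + 1)).sum := by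
    rw [← jp_length, ← h1, List.length_append]; simp
  rw [← h1, show (ts.map (fun t => t.length + 1)).sum - 1 = (PySem.Chars.join [' '] ts).length by omega,
    List.take_left]

theorem flatten_take_sum {α : Type} (l : List (List α)) (k : Nat) :
    (l.take k).flatten = l.flatten.take (((l.take k).map List.length).sum) := by
  induction l generalizing k with
  | nil => simp
  | cons a rest ih =>
    cases k with
    | zero => simp
    | succ k' =>
      simp only [List.take_succ_cons, List.flatten_cons, List.map_cons, List.sum_cons]
      rw [List.take_length_add_append, ih k']

theorem jp_take (l : List (List Char)) (k : Nat) :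
    JpB (l.take k) = (JpB l).take (((l.take k).map (fun t => t.length + 1)).sum) := by
  have h1 : JpB (l.take k) = ((l.map (fun t => t ++ [' '])).take k).flatten := by
    simp [JpB, List.map_take]
  rw [h1, flatten_take_sum]
  have h2 : ((l.map (fun t => t ++ [' '])).take k).map List.length
      = (l.take k).map (fun t => t.length + 1) := by
    rw [← List.map_take, List.map_map, len_comp_space, List.map_take]
  rw [h2]
  rfl

theorem jp_flatten_rep (toks : List (List Char)) (K : Nat) :
    JpB ((List.replicate K toks).flatten) = (List.replicate K (JpB toks)).flatten := by
  induction K with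
  | zero => simp [JpB]
  | succ k ih =>
    rw [List.replicate_succ, List.flatten_cons, List.replicate_succ, List.flatten_cons]
    have happ : ∀ (a b : List (List Char)), JpB (a ++ b) = JpB a ++ JpB b := by
      intro a b; simp [JpB]
    rw [happ, ih]

theorem take_cyc {α : Type} (toks : List (List α)) (_htoks : toks ≠ []) :
    ∀ (a K r : Nat), r ≤ toks.length → a < K →
    ((List.replicate K toks).flatten).take (a * toks.length + r) =
      (List.replicate a toks).flatten ++ toks.take r := by
  intro a
  induction a with
  | zero =>
    intro K r hr hK
    cases K with
    | zero => omega
    | succ k =>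
      simp only [List.replicate_succ, List.flatten_cons, Nat.zero_mul, Nat.zero_add]
      rw [List.take_append_of_le_length hr]
      simp
  | succ a' ih =>
    intro K r hr hK
    cases K with
    | zero => omega
    | succ k =>
      simp only [List.replicate_succ, List.flatten_cons]
      have : (a' + 1) * toks.length + r = toks.length + (a' * toks.length + r) := by ring
      rw [this, List.take_length_add_append, ih k r hr (by omega)]
      simp

theorem sum_flatten_rep {α : Type} (toks : List (List α)) (g : List α → Nat) :
    ∀ a, (((List.replicate a toks).flatten).map g).sum = a * ((toks.map g).sum) := by
  intro a
  induction a with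
  | zero => simp
  | succ a' ih =>
    rw [List.replicate_succ, List.flatten_cons, List.map_append, List.sum_append, ih]
    ring

theorem isIn_nil_right (encm : List Char) :
    PySem.Chars.isIn encm [] = decide (encm = []) := by
  cases encm with
  | nil => simp [PySem.Chars.isIn_nil]
  | cons c r =>
    have hni : ¬ ((c :: r) <:+: ([] : List Char)) := by
      intro h; have := h.length_le; simp at this
    cases hb : PySem.Chars.isIn (c :: r) [] with
    | false => simp
    | true => exact absurd ((PySem.Chars.isIn_iff_infix _ _).mp hb) hni

theorem seg_stable (P : List Char) (L j K K' : Nat) (hKK' : K ≤ K')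
    (h : j + L ≤ K * P.length) :
    (((List.replicate K' P).flatten).drop j).take L =
      (((List.replicate K P).flatten).drop j).take L := by
  have hsplit : (List.replicate K' P) = List.replicate K P ++ List.replicate (K' - K) P := by
    rw [← List.replicate_add]; congr 1; omega
  rw [hsplit, List.flatten_append,
    List.drop_append_of_le_length (by rw [flatten_replicate_length]; omega),
    List.take_append_of_le_length (by rw [List.length_drop, flatten_replicate_length]; omega)]

theorem seg_mod (P : List Char) (hc : 1 ≤ P.length) (L R : Nat) :
    ∀ j K, j + L ≤ K * P.length → (j % P.length) + L ≤ R * P.length →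
    (((List.replicate K P).flatten).drop j).take L =
      (((List.replicate R P).flatten).drop (j % P.length)).take L := by
  intro j
  induction j using Nat.strong_induction_on with
  | _ j ih =>
    intro K hK hR
    by_cases hj : j < P.length
    · rw [Nat.mod_eq_of_lt hj] at *
      rcases Nat.le_total K R with hle | hle
      · exact (seg_stable P L j K R hle hK).symm
      · exact seg_stable P L j R K hle hR
    · push_neg at hj
      obtain ⟨j', rfl⟩ : ∃ j', j = P.length + j' := ⟨j - P.length, by omega⟩
      have hK1 : 1 ≤ K := by nlinarith
      obtain ⟨k', rfl⟩ : ∃ k', K = k' + 1 := ⟨K - 1, by omega⟩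
      have h1 : (List.replicate (k' + 1) P).flatten = P ++ (List.replicate k' P).flatten := by
        simp [List.replicate_succ]
      rw [Nat.add_mod_left] at hR
      rw [h1, List.drop_length_add_append, Nat.add_mod_left]
      exact ih j' (by omega) k' (by nlinarith) hR

theorem cont_window (encm P : List Char) (hc : 1 ≤ P.length) (T K R : Nat)
    (hTK : T ≤ K * P.length) (hR : P.length + encm.length - 1 ≤ R * P.length) :
    PySem.Chars.isIn encm (((List.replicate K P).flatten).take T) =
      PySem.Chars.isIn encm (((List.replicate R P).flatten).take
        (min T (P.length + encm.length - 1))) := by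
  set L := encm.length with hL
  cases hLz : encm with
  | nil => rw [PySem.Chars.isIn_nil, PySem.Chars.isIn_nil]
  | cons e0 er =>
    rw [← hLz]
    have hL1 : 1 ≤ L := by rw [hL, hLz]; simp
    set T' := min T (P.length + L - 1) with hT'
    have hT'R : T' ≤ R * P.length := by omega
    have hlen1 : (((List.replicate K P).flatten).take T).length = T := by
      rw [List.length_take, flatten_replicate_length]; omega
    have hlen2 : (((List.replicate R P).flatten).take T').length = T' := by
      rw [List.length_take, flatten_replicate_length]; omega
    -- both sides as existence of an occurrence position
    have iffs : (PySem.Chars.isIn encm (((List.replicate K P).flatten).take T) = true) ↔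
        (PySem.Chars.isIn encm (((List.replicate R P).flatten).take T') = true) := by
      rw [← PySem.Chars.exists_prefix_drop_iff_isIn, ← PySem.Chars.exists_prefix_drop_iff_isIn]
      constructor
      · rintro ⟨j, hpre⟩
        have hjL : j + L ≤ T := by
          have h1 := hpre.length_le
          rw [List.length_drop, hlen1] at h1
          have hne : ((((List.replicate K P).flatten).take T).drop j) ≠ [] := by
            intro hnil; rw [hnil] at hpre
            have := List.prefix_nil.mp hpre
            rw [this] at hLz; simp at hLz
          have : j < T := by
            by_contra hcon
            push_neg at hcon
            have : (((List.replicate K P).flatten).take T).drop j = [] := by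
              apply List.drop_eq_nil_of_le; omega
            exact hne this
          omega
        have hval : encm = (((List.replicate K P).flatten).drop j).take L := by
          have := List.prefix_iff_eq_take.mp hpre
          rw [this, ← hL, List.drop_take, List.take_take]
          congr 1
          omega
        have hmod := seg_mod P hc L R j K (by omega)
          (by have := Nat.mod_lt j (show 0 < P.length by omega); omega)
        rw [hmod] at hval
        set q := j % P.length with hq
        have hqT' : q + L ≤ T' := by
          have h1 : q ≤ j := Nat.mod_le _ _
          have h2 : q < P.length := Nat.mod_lt _ (by omega)
          omega
        refine ⟨q, ?_⟩
        rw [List.prefix_iff_eq_take, ← hL, hval, List.drop_take, List.take_take]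
        congr 1
        omega
      · rintro ⟨j, hpre⟩
        have hjL : j + L ≤ T' := by
          have hne : ((((List.replicate R P).flatten).take T').drop j) ≠ [] := by
            intro hnil; rw [hnil] at hpre
            have := List.prefix_nil.mp hpre
            rw [this] at hLz; simp at hLz
          have h1 := hpre.length_le
          rw [List.length_drop, hlen2] at h1
          have : j < T' := by
            by_contra hcon
            push_neg at hcon
            have : (((List.replicate R P).flatten).take T').drop j = [] := by
              apply List.drop_eq_nil_of_le; omega
            exact hne this
          omega
        have hval : encm = (((List.replicate R P).flatten).drop j).take L := by
          have := List.prefix_iff_eq_take.mp hpre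
          rw [this, ← hL, List.drop_take, List.take_take]
          congr 1
          omega
        have hstab : (((List.replicate R P).flatten).drop j).take L =
            (((List.replicate K P).flatten).drop j).take L := by
          rcases Nat.le_total R K with hle | hle
          · exact (seg_stable P L j R K hle (by omega)).symm
          · exact seg_stable P L j K R hle (by omega)
        rw [hstab] at hval
        refine ⟨j, ?_⟩
        rw [List.prefix_iff_eq_take, ← hL, hval, List.drop_take, List.take_take]
        congr 1
        omega
    rcases hb1 : PySem.Chars.isIn encm (((List.replicate K P).flatten).take T) with _ | _ <;>
      rcases hb2 : PySem.Chars.isIn encm (((List.replicate R P).flatten).take T') with _ | _ <;>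
        simp_all

theorem sum_len_cast (toks : List (List Char)) :
    (toks.map (fun t => PySem.List.len t + 1)).sum =
      (((toks.map (fun t => t.length + 1)).sum : Nat) : Int) := by
  induction toks with
  | nil => simp
  | cons t ts ih =>
    rw [List.map_cons, List.sum_cons, PySem.List.len_eq, ih, List.map_cons, List.sum_cons,
      Nat.cast_add, Nat.cast_add, Nat.cast_one]

-- the main bridge: A's replayed string containment equals B's period-bounded test
theorem isIn_whileA (encm : List Char) (toks : List (List Char)) (htoks : toks ≠ [])
    (N : Nat) :
    PySem.Chars.isIn encm (whileA (N : Int) toks (N + 1) [] 0) =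
      matchedB encm toks (N : Int) := by
  have hn : 1 ≤ toks.length := List.length_pos_of_ne_nil htoks
  have hw := whileA_spec N toks htoks N [] (by simp) (by simp; nlinarith)
  simp only [List.length_nil, Nat.cast_zero, List.nil_append, Nat.sub_zero] at hw
  rw [hw]
  rcases Nat.eq_zero_or_pos N with rfl | hN1
  · rw [List.take_zero, PySem.Chars.join_nil, isIn_nil_right, matchedB]
    simp
  -- abbreviations for the N ≥ 1 case
  have hNne : ((N : Int)) ≠ 0 := by exact_mod_cast Nat.pos_iff_ne_zero.mp hN1
  set n := toks.length with hn'
  set a := N / n with ha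
  set r := N % n with hr
  set lensN := toks.map (fun t => t.length + 1) with hlensN
  set cN := lensN.sum with hcNdef
  set SN := a * cN + (lensN.take r).sum with hSN
  set L := encm.length with hLdef
  have hcN : n ≤ cN := by
    rw [hcNdef, hlensN]
    calc n = (toks.map (fun _ => 1)).sum := by simp [hn']
    _ ≤ _ := by
      apply List.sum_le_sum
      intro t _
      omega
  have hcN1 : 1 ≤ cN := le_trans hn hcN
  have hpartial_le : (lensN.take r).sum ≤ cN := by
    rw [hcNdef]
    exact (List.take_sublist r lensN).sum_le_sum (by intro x _; omega)
  have haN : a ≤ N := Nat.div_le_self N n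
  have hSN1 : 1 ≤ SN := by
    rcases Nat.eq_zero_or_pos a with ha0 | ha1
    · have hrN : r = N := by
        rw [hr]
        apply Nat.mod_eq_of_lt
        by_contra hcon
        push_neg at hcon
        have : 1 ≤ N / n := (Nat.le_div_iff_mul_le (by omega)).mpr (by omega)
        omega
      cases toks with
      | nil => exact absurd rfl htoks
      | cons t0 rest =>
        obtain ⟨r', hr'⟩ : ∃ r', r = r' + 1 := ⟨r - 1, by omega⟩
        rw [hSN, hlensN, hr', List.map_cons, List.take_succ_cons, List.sum_cons]
        omega
    · have : cN ≤ a * cN := Nat.le_mul_of_pos_left cN ha1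
      omega
  have hSNle : SN ≤ (N + 1) * cN := by
    have h1 : SN ≤ (a + 1) * cN := by rw [hSN]; nlinarith
    have h2 : (a + 1) * cN ≤ (N + 1) * cN := Nat.mul_le_mul_right cN (by omega)
    omega
  -- A side: the replayed string is a take of the repeated period
  have h1 : (List.replicate (N+1) toks).flatten.take N =
      (List.replicate a toks).flatten ++ toks.take r := by
    have hcyc := take_cyc toks htoks a (N+1) r (Nat.le_of_lt (Nat.mod_lt N (by omega)))
      (by omega)
    have h2 : a * toks.length + r = N := by
      rw [ha, hr, hn']
      exact Nat.div_add_mod' N toks.length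
    rw [h2] at hcyc
    exact hcyc
  have hStotal : (((List.replicate (N+1) toks).flatten.take N).map (fun t => t.length + 1)).sum = SN := by
    rw [h1, List.map_append, List.sum_append, hSN]
    congr 1
    · rw [sum_flatten_rep toks (fun t => t.length + 1) a, hcNdef, hlensN]
    · rw [hlensN, List.map_take]
  have hts_ne : (List.replicate (N+1) toks).flatten.take N ≠ [] := by
    intro hnil
    have := congrArg List.length hnil
    rw [List.length_take, flatten_replicate_length] at this
    simp only [List.length_nil] at this
    have hmin : min N ((N+1) * n) = 0 := this
    rcases Nat.min_eq_zero_iff.mp hmin with h | h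
    · omega
    · rcases Nat.mul_eq_zero.mp h with h' | h' <;> omega
  have hplayed : PySem.Chars.join [' '] ((List.replicate (N+1) toks).flatten.take N) =
      (List.replicate (N+1) (JpB toks)).flatten.take (SN - 1) := by
    rw [join_eq_take _ hts_ne, hStotal, jp_take, hStotal, jp_flatten_rep, List.take_take]
    congr 1
    omega
  have hPlen : (JpB toks).length = cN := by rw [jp_length, hcNdef, hlensN]
  -- B side: unfold matchedB to a take of the repeated period
  have hcast1 : (toks.map (fun t => PySem.List.len t + 1)).sum = (cN : Int) := by
    rw [hcNdef, hlensN]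
    exact sum_len_cast toks
  have hcast2 : ((toks.map (fun t => PySem.List.len t + 1)).take r).sum =
      (((lensN.take r).sum : Nat) : Int) := by
    rw [← List.map_take, sum_len_cast, hlensN, List.map_take]
  simp only [PySem.List.len_eq] at hcast1 hcast2
  have hjoin := join_append_space toks htoks
  have hT1 : ((a : Int)) * ((cN : Nat) : Int) + (((lensN.take r).sum : Nat) : Int) - 1 =
      (((SN - 1 : Nat)) : Int) := by
    rw [Nat.cast_sub hSN1, hSN]
    push_cast
    ring
  have hT2 : ((cN : Nat) : Int) + ((L : Nat) : Int) - 1 = (((cN + L - 1 : Nat)) : Int) := by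
    rw [Nat.cast_sub (by omega)]
    push_cast
    ring
  have htoNat : ((((L / cN : Nat)) : Int) + 2).toNat = L / cN + 2 := by
    have hx : ((((L / cN : Nat)) : Int) + 2) = (((L / cN + 2 : Nat)) : Int) := by push_cast; ring
    rw [hx, Int.toNat_natCast]
  have hB : matchedB encm toks (N : Int) =
      PySem.Chars.isIn encm ((List.replicate (L / cN + 2) (JpB toks)).flatten.take
        (min (SN - 1) (cN + L - 1))) := by
    rw [matchedB, if_neg hNne]
    simp only [PySem.List.len_eq, ← hn', ← hLdef, PySem.Int.floordiv_natCast,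
      PySem.Int.mod_natCast, ← ha, ← hr, PySem.List.slice_to_natCast, hcast1, hcast2, hT1, hT2,
      ← Nat.cast_min, hjoin, PySem.List.pyRepeat, htoNat]
  have hcw := cont_window encm (JpB toks) (by rw [hPlen]; exact hcN1) (SN - 1) (N + 1)
    (L / cN + 2)
    (by rw [hPlen]; omega)
    (by
      rw [hPlen, ← hLdef]
      have hdm := Nat.div_add_mod' L cN
      have hml := Nat.mod_lt L (show 0 < cN by omega)
      rw [Nat.add_mul]
      omega)
  rw [hPlen, ← hLdef] at hcw
  rw [hplayed, hB]
  exact hcw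

-- per-info candidate (proof-side characterisation of one loop iteration)
def cand1 (mEnc : List Char) (info : String) : Option (Int × String) :=
  match PySem.Str.split? info "," with
  | some [st, en, title, mel] =>
    let pt := minutesB en - minutesB st
    if matchedB mEnc (encodeB mel.toList) pt then some (pt, title) else none
  | _ => none

theorem pvMin_eq (t : String) (h : pvTimeOk t = true) : minutesB t = pvMin t := by
  unfold pvTimeOk at h
  split at h
  case h_1 a b heq =>
    rcases hsp : PySem.Str.split? t ":" with _ | l <;> rw [hsp] at heq
    · simp at heq
    · simp only [Option.getD_some] at heq
      rcases l with _ | ⟨x1, _ | ⟨x2, _ | t3⟩⟩ <;> simp at heq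
      obtain ⟨h1, h2⟩ := heq
      unfold minutesB pvMin
      rw [hsp]
      simp [h1, h2]
  case h_2 => simp at h

theorem calPlayTimeA_eq (st en : String) (hs : pvTimeOk st = true) (he : pvTimeOk en = true) :
    calPlayTimeA st en = minutesB en - minutesB st := by
  unfold pvTimeOk at hs he
  split at hs
  case h_2 => simp at hs
  case h_1 a b heqs =>
    split at he
    case h_2 => simp at he
    case h_1 c d heqe =>
      rcases hsp : PySem.Str.split? st ":" with _ | l <;> rw [hsp] at heqs
      · simp at heqs
      · simp only [Option.getD_some] at heqs
        rcases l with _ | ⟨x1, _ | ⟨x2, _ | t3⟩⟩ <;> simp at heqs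
        obtain ⟨h1, h2⟩ := heqs
        rcases hep : PySem.Str.split? en ":" with _ | l' <;> rw [hep] at heqe
        · simp at heqe
        · simp only [Option.getD_some] at heqe
          rcases l' with _ | ⟨y1, _ | ⟨y2, _ | t4⟩⟩ <;> simp at heqe
          obtain ⟨h3, h4⟩ := heqe
          unfold calPlayTimeA minutesB
          rw [hsp, hep]
          simp [h1, h2, h3, h4]

theorem encodeB_ne_nil (cs : List Char) (h : cs ≠ []) : encodeB cs ≠ [] := by
  cases cs with
  | nil => exact absurd rfl h
  | cons c rest => rw [encodeB]; exact List.cons_ne_nil _ _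

-- one loop iteration of A collapses to the candidate form under the per-info precondition
theorem stepA_cand (mEnc : List Char) (acc : List (Int × Int × String)) (info : String)
    (hpre : (pvParts info).length = 4 ∧
      pvTimeOk ((pvParts info).getD 0 "") = true ∧
      pvTimeOk ((pvParts info).getD 1 "") = true ∧
      ((pvParts info).getD 3 "").toList ≠ [] ∧
      ((pvParts info).getD 3 "").toList.head? ≠ some '#' ∧
      0 ≤ pvMin ((pvParts info).getD 1 "") - pvMin ((pvParts info).getD 0 "")) :
    stepA mEnc acc info = (match cand1 mEnc info with
      | none => acc
      | some c => acc ++ [(c.1, PySem.List.len acc, c.2)]) := by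
  obtain ⟨h4, hts, hte, hmel, hmelh, hpt⟩ := hpre
  unfold pvParts at h4 hts hte hmel hmelh hpt
  rcases hsp : PySem.Str.split? info "," with _ | l
  · rw [hsp] at h4; simp at h4
  · rw [hsp] at h4 hts hte hmel hmelh hpt
    rcases l with _ | ⟨st, _ | ⟨en, _ | ⟨title, _ | ⟨mel, _ | t⟩⟩⟩⟩ <;> simp at h4
    simp only [Option.getD_some, List.getD_cons_zero, List.getD_cons_succ] at hts hte hmel hmelh hpt
    unfold stepA cand1
    rw [hsp]
    have hcal : calPlayTimeA st en = minutesB en - minutesB st := calPlayTimeA_eq st en hts hte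
    have hsep : sepSharpA mel.toList = encodeB mel.toList := by
      rw [sepSharpA_eq]
      exact sep_fold_eq mel.toList hmelh []
    have hpt' : 0 ≤ minutesB en - minutesB st := by
      rw [pvMin_eq st hts, pvMin_eq en hte]; exact hpt
    obtain ⟨N, hN⟩ : ∃ N : Nat, minutesB en - minutesB st = (N : Int) :=
      ⟨(minutesB en - minutesB st).toNat, (Int.toNat_of_nonneg hpt').symm⟩
    have hin : PySem.Chars.isIn mEnc
        (whileA (minutesB en - minutesB st) (encodeB mel.toList)
          ((minutesB en - minutesB st).toNat + 1) [] 0) =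
        matchedB mEnc (encodeB mel.toList) (minutesB en - minutesB st) := by
      rw [hN, Int.toNat_natCast]
      exact isIn_whileA mEnc (encodeB mel.toList) (encodeB_ne_nil mel.toList hmel) N
    simp only [hcal, hsep, hin]
    by_cases hm : matchedB mEnc (encodeB mel.toList) (minutesB en - minutesB st) <;> simp [hm]

theorem foldA_eq (mEnc : List Char) : ∀ (infos : List String) (acc : List (Int × Int × String)),
    (∀ info ∈ infos,
      (pvParts info).length = 4 ∧
      pvTimeOk ((pvParts info).getD 0 "") = true ∧
      pvTimeOk ((pvParts info).getD 1 "") = true ∧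
      ((pvParts info).getD 3 "").toList ≠ [] ∧
      ((pvParts info).getD 3 "").toList.head? ≠ some '#' ∧
      0 ≤ pvMin ((pvParts info).getD 1 "") - pvMin ((pvParts info).getD 0 "")) →
    infos.foldl (stepA mEnc) acc =
      acc ++ (PySem.List.enumerate (infos.filterMap (cand1 mEnc)) (acc.length : Int)).map
        (fun p => (p.2.1, p.1, p.2.2)) := by
  intro infos
  induction infos with
  | nil => intro acc _; simp
  | cons info rest ih =>
    intro acc hpre
    rw [List.foldl_cons, List.filterMap_cons, stepA_cand mEnc acc info (hpre info (by simp))]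
    cases h : cand1 mEnc info with
    | none => simp only []; rw [ih acc (fun i hi => hpre i (List.mem_cons_of_mem _ hi))]
    | some c =>
      simp only []
      rw [ih (acc ++ [(c.1, PySem.List.len acc, c.2)]) (fun i hi => hpre i (List.mem_cons_of_mem _ hi))]
      rw [PySem.List.enumerate_cons]
      simp only [List.length_append, List.length_singleton, List.map_cons, PySem.List.len_eq,
        List.append_assoc, List.singleton_append]
      push_cast
      ring_nf

theorem stepB_cand (mEnc : List Char) (cands : List (Int × String)) (info : String) :
    stepB mEnc cands info = (match cand1 mEnc info with
      | none => cands
      | some c => cands ++ [c]) := by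
  unfold stepB cand1
  rcases PySem.Str.split? info "," with _ | l
  · rfl
  · rcases l with _ | ⟨x1, _ | ⟨x2, _ | ⟨x3, _ | ⟨x4, _ | t⟩⟩⟩⟩ <;> try rfl
    by_cases hm : matchedB mEnc (encodeB x4.toList) (minutesB x2 - minutesB x1) <;> simp [hm]

theorem foldB_eq (mEnc : List Char) : ∀ (infos : List String) (cands : List (Int × String)),
    infos.foldl (stepB mEnc) cands = cands ++ infos.filterMap (cand1 mEnc) := by
  intro infos
  induction infos with
  | nil => intro cands; simp
  | cons info rest ih =>
    intro cands
    rw [List.foldl_cons, List.filterMap_cons, stepB_cand]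
    cases h : cand1 mEnc info <;> simp [ih]

def bestStep (b : Option (Int × String)) (c : Int × String) : Option (Int × String) :=
  match b with
  | none => some c
  | some q => if q.1 < c.1 then some c else b

theorem max?_eq_bestFold (cand : List (Int × String)) :
    PySem.List.max? cand (fun x => x.1) = cand.foldl bestStep none := by
  unfold PySem.List.max?
  congr 1
  funext b c
  cases b <;> simp [bestStep]

theorem bestFold_spec : ∀ (cand : List (Int × String)), cand ≠ [] →
    ∃ k, ∃ hk : k < cand.length, cand.foldl bestStep none = some cand[k] ∧
      (∀ j (hj : j < cand.length), cand[j].1 ≤ cand[k].1) ∧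
      (∀ j (hj : j < cand.length), j < k → cand[j].1 < cand[k].1) := by
  intro cand
  induction cand using List.reverseRecOn with
  | nil => intro h; exact absurd rfl h
  | append_singleton l x ih =>
    intro _
    rw [List.foldl_append]
    rcases eq_or_ne l [] with rfl | hl
    · refine ⟨0, by simp, by simp [bestStep], ?_, ?_⟩
      · intro j hj; simp at hj; subst hj; simp
      · intro j hj hj0; omega
    · obtain ⟨k, hk, hbf, hle, hlt⟩ := ih hl
      rw [hbf]
      by_cases hx : l[k].1 < x.1
      · refine ⟨l.length, by simp, ?_, ?_, ?_⟩
        · simp [bestStep, hx]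
        · intro j hj
          simp only [List.length_append, List.length_singleton] at hj
          rcases Nat.lt_or_ge j l.length with h | h
          · rw [List.getElem_append_left h, List.getElem_concat_length]
            exact le_of_lt (lt_of_le_of_lt (hle j h) hx)
            rfl
          · have : j = l.length := by omega
            subst this
            simp
        · intro j hj hj0
          rw [List.getElem_append_left hj0, List.getElem_concat_length]
          exact lt_of_le_of_lt (hle j hj0) hx
          rfl
      · refine ⟨k, by simp; omega, ?_, ?_, ?_⟩
        · simp [bestStep, hx, List.getElem_append_left hk]
        · intro j hj
          simp only [List.length_append, List.length_singleton] at hj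
          rw [List.getElem_append_left hk]
          rcases Nat.lt_or_ge j l.length with h | h
          · rw [List.getElem_append_left h]; exact hle j h
          · have : j = l.length := by omega
            subst this
            rw [List.getElem_concat_length]
            omega
            rfl
        · intro j hj hjk
          have hjl : j < l.length := by omega
          rw [List.getElem_append_left hk, List.getElem_append_left hjl]
          exact hlt j hjl hjk

-- ===== VERDICT (by name: the statement is the Claim_ definition above) =====
theorem solution_spec : Claim_equal_solution := by
  intro m infos hdom hpre
  obtain ⟨hm, hinfos⟩ := hpre
  show solution m infos = solution_alt m infos
  unfold solution solution_alt
  have hmE : sepSharpA m.toList = encodeB m.toList := by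
    rw [sepSharpA_eq]; exact sep_fold_eq m.toList hm []
  rw [hmE, foldA_eq _ infos [] hinfos, foldB_eq, max?_eq_bestFold]
  simp only [List.length_nil, Nat.cast_zero, List.nil_append]
  set cand := infos.filterMap (cand1 (PySem.Chars.join [' '] (encodeB m.toList))) with hcand
  rcases eq_or_ne cand [] with hc | hc
  · rw [hc]; rfl
  · obtain ⟨k, hk, hbf, hle, hlt⟩ := bestFold_spec cand hc
    rw [hbf]
    set answer := (PySem.List.enumerate cand 0).map (fun p => (p.2.1, p.1, p.2.2)) with hans
    have hanslen : answer.length = cand.length := by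
      simp [hans, PySem.List.length_enumerate]
    obtain ⟨hd, tl, hS⟩ : ∃ hd tl,
        PySem.List.sorted answer (fun x => toLex (-x.1, x.2.1)) = hd :: tl := by
      rcases h : PySem.List.sorted answer (fun x => toLex (-x.1, x.2.1)) with _ | ⟨hd, tl⟩
      · exfalso
        have := PySem.List.sorted_perm answer (fun x => toLex (-x.1, x.2.1)) false
        rw [h] at this
        have := this.length_eq
        simp at this
        rw [← this] at hanslen
        exact hc (List.length_eq_zero_iff.mp hanslen.symm)
      · exact ⟨hd, tl, rfl⟩
    rw [hS]
    have hdmem : hd ∈ answer := by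
      have := (PySem.List.mem_sorted answer (fun x => toLex (-x.1, x.2.1)) false hd).1
      rw [hS] at this
      exact this (List.mem_cons_self)
    obtain ⟨i, hi, hdef⟩ : ∃ i, ∃ hi : i < cand.length, hd = (cand[i].1, (i : Int), cand[i].2) := by
      rw [hans] at hdmem
      obtain ⟨p, hp, hpe⟩ := List.mem_map.mp hdmem
      obtain ⟨j, hj, hq⟩ := (PySem.List.mem_enumerate_iff cand 0 p).mp hp
      exact ⟨j, hj, by rw [← hpe, hq]; simp⟩
    have hmin := PySem.List.key_head_sorted_le answer (fun x => toLex (-x.1, x.2.1)) hS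
    have hy0 : ((cand[k].1, (k : Int), cand[k].2) : Int × Int × String) ∈ answer := by
      rw [hans]
      refine List.mem_map.mpr ⟨((k : Int), cand[k]), ?_, rfl⟩
      exact (PySem.List.mem_enumerate_iff cand 0 _).mpr ⟨k, hk, by simp⟩
    have h1 := hmin _ hy0
    rw [hdef] at h1
    rw [Prod.Lex.le_iff] at h1
    simp only [ofLex_toLex] at h1
    have hile : cand[i].1 = cand[k].1 ∧ i ≤ k := by
      rcases h1 with h1 | ⟨h1a, h1b⟩
      · exfalso
        have := hle i hi
        omega
      · constructor
        · omega
        · exact_mod_cast h1b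
    have hik : i = k := by
      rcases Nat.lt_or_ge i k with h | h
      · exfalso
        have := hlt i hi h
        omega
      · omega
    subst hik
    rw [hdef]
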